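-- pv_equiv track=rewrite | github.com/SAP-samples/multimodal-generative-ai-for-bpm | src/multimodalgenai/evaluation/list_similarity.py | index_list
-- ===== SOURCE A (Python) =====
-- def index_list(list):
--     """ takes a list and adds an index for every item in the list.
--         for example takes ["a", "b", "c", "c", "d", "b"]
--         and produces ["a1", "b1", "c1", "c2", "d1", "b2"]"""
--
--     count = {}
--     indexed_list = []
--     for item in list:
--         index = count.get(item, 0)
--         indexed_list.append(f"{item}{index}")
--         count[item] = index + 1
--     return indexed_list
-- ===== SOURCE B (Python) =====
-- def index_list(list):
--     """takes a list and adds an index for every item in the list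
--        (occurrence index counted from 0, matching the original)."""
--     return [f"{item}{list[:i].count(item)}" for i, item in enumerate(list)]
-- ===== Notes on version B (the rewrite author's own statement) =====
-- stated objective: simpler
-- what changed: Replaced the running-dict fold (mutable counter dict plus accumulator list) by a single comprehension that recomputes each occurrence index as list[:i].count(item), a prefix-rescan with no carried state.
import Mathlib
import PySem

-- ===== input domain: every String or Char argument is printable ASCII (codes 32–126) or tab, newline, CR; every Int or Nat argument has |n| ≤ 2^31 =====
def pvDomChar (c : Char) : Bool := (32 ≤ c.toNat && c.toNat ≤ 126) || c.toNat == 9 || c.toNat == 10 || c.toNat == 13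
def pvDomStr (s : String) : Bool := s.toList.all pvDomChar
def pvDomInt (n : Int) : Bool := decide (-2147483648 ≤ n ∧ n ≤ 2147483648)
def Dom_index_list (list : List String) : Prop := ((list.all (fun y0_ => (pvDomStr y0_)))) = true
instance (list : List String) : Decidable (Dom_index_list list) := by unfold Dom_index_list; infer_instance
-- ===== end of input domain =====

-- B replaces A's running counter dict by a stateless comprehension that rescans the prefix (simpler, not faster).

-- ===== PORT A =====
def index_list (list : List String) : List String :=
  (list.foldl
    (fun (st : PySem.Dict String Int × List String) item =>
      let index := st.1.getD item 0
      (st.1.insert item (index + 1), st.2 ++ [item ++ PySem.Int.toStr index]))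
    (PySem.Dict.empty, [])).2

-- ===== PORT B =====
def index_list_alt (list : List String) : List String :=
  (PySem.List.enumerate list).map
    (fun p => p.2 ++ PySem.Int.toStr (((PySem.List.slice list none (some p.1)).count p.2 : Int)))

-- ===== PRECONDITION & SPEC =====
def Spec_index_list (list : List String) (out : List String) : Prop := out = index_list_alt list
instance (list : List String) (out : List String) : Decidable (Spec_index_list list out) := by unfold Spec_index_list; infer_instance

-- ===== CLAIM (what is proved, stated in full; the proofs are below) =====
def Claim_equal_index_list : Prop := ∀ (list : List String), Dom_index_list list → Spec_index_list list (index_list list)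

-- ===== LEMMAS AND PROOFS =====

-- loop invariant: folding A's step from a dict holding exactly the counts of `pref`
-- produces `acc` followed by B's indexed items at absolute positions starting at pref.length
lemma index_list_aux (rest : List String) (pref : List String) (d : PySem.Dict String Int)
    (acc : List String) (hd : ∀ x, d.getD x 0 = (pref.count x : Int)) :
    (rest.foldl
      (fun (st : PySem.Dict String Int × List String) item =>
        let index := st.1.getD item 0
        (st.1.insert item (index + 1), st.2 ++ [item ++ PySem.Int.toStr index]))
      (d, acc)).2
    = acc ++ (PySem.List.enumerate rest (pref.length : Int)).map
        (fun p => p.2 ++ PySem.Int.toStr (((PySem.List.slice (pref ++ rest) none (some p.1)).count p.2 : Int))) := by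
  induction rest generalizing pref d acc with
  | nil => simp [PySem.List.enumerate_nil]
  | cons y ys ih =>
    simp only [List.foldl_cons, PySem.List.enumerate_cons, List.map_cons]
    have hstep := ih (pref ++ [y]) (d.insert y (d.getD y 0 + 1)) (acc ++ [y ++ PySem.Int.toStr (d.getD y 0)])
      (by
        intro x
        have h := PySem.Dict.getD_foldl_insert_add_one (l := [y]) (d := d) (v := x)
        simp only [List.foldl_cons, List.foldl_nil] at h
        rw [h, hd x, List.count_append]
        push_cast
        ring)
    rw [hstep]
    have hlen : ((pref ++ [y]).length : Int) = (pref.length : Int) + 1 := by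
      simp
    have hassoc : (pref ++ [y]) ++ ys = pref ++ y :: ys := by simp
    rw [hlen, hassoc] at hstep ⊢
    have hhead : PySem.List.slice (pref ++ y :: ys) none (some (pref.length : Int)) = pref := by
      rw [PySem.List.slice_to_natCast]
      exact List.take_left
    rw [hhead, hd y]
    simp

lemma count_empty_dict (x : String) :
    (PySem.Dict.empty : PySem.Dict String Int).getD x 0 = (([] : List String).count x : Int) := by
  simp [PySem.Dict.getD, PySem.Dict.get?, PySem.Dict.empty]

-- ===== VERDICT (by name: the statement is the Claim_ definition above) =====
theorem index_list_spec : Claim_equal_index_list := by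
  intro list _
  unfold Spec_index_list index_list index_list_alt
  rw [index_list_aux list [] PySem.Dict.empty [] count_empty_dict]
  simp
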